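-- pv_equiv track=rewrite | github.com/aashaanX/Pycodes | challenge1.py | beautifulIndex
-- ===== SOURCE A (Python) =====
-- def beautifulIndex(lista,listb):
-- 	a= sorted(lista)
-- 	b= sorted(listb)
-- 	beautiful_pair=[]
-- 	for i in range(len(a)):
-- 		for j in range(len(b)):
-- 			if a[i] == b[j]:
-- 				beautiful_pair.append((i,j))
-- 	return beautiful_pair
-- ===== SOURCE B (Python) =====
-- def beautifulIndex(lista, listb):
--     a = sorted(lista)
--     b = sorted(listb)
--     pos = {}
--     for j, v in enumerate(b):
--         pos.setdefault(v, []).append(j)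
--     out = []
--     for i, v in enumerate(a):
--         for j in pos.get(v, []):
--             out.append((i, j))
--     return out
-- ===== Notes on version B (the rewrite author's own statement) =====
-- stated objective: alternative
-- what changed: Replaces the quadratic nested scan over both sorted lists by a single pass building a dict value -> sorted indices of b, each element of a then emitting its matches by one lookup (same cost when the output itself is quadratic).
import Mathlib
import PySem

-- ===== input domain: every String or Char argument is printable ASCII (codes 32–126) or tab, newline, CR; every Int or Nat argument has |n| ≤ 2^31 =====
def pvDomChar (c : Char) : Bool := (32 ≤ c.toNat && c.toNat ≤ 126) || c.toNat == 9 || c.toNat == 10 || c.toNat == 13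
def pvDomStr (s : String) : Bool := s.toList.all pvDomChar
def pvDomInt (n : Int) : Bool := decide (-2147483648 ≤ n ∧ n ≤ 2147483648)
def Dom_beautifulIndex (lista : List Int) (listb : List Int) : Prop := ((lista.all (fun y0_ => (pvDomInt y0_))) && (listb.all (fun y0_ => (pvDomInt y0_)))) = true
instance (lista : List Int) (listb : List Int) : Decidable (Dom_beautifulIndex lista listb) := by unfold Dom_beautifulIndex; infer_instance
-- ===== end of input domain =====

-- B replaces A's nested scan by a one-pass dict index value -> sorted indices of b (alternative algorithm; cost meets A's when the output is itself quadratic).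

-- ===== PORT A =====
def beautifulIndex (lista : List Int) (listb : List Int) : List (Int × Int) :=
  let a := PySem.List.sorted lista (fun x => x) false
  let b := PySem.List.sorted listb (fun x => x) false
  (PySem.List.pyRange 0 (a.length : Int) 1).foldl (fun acc i =>
    (PySem.List.pyRange 0 (b.length : Int) 1).foldl (fun acc2 j =>
      if PySem.List.pyGetD a i 0 = PySem.List.pyGetD b j 0 then acc2 ++ [(i, j)] else acc2) acc) []

-- ===== PORT B =====
def beautifulIndex_alt (lista : List Int) (listb : List Int) : List (Int × Int) :=
  let a := PySem.List.sorted lista (fun x => x) false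
  let b := PySem.List.sorted listb (fun x => x) false
  let pos : PySem.Dict Int (List Int) :=
    (PySem.List.enumerate b 0).foldl (fun d p => d.modify p.2 [] (fun t => t ++ [p.1])) PySem.Dict.empty
  (PySem.List.enumerate a 0).foldl (fun acc p => acc ++ (pos.getD p.2 []).map (fun j => (p.1, j))) []

-- ===== PRECONDITION & SPEC =====
def Spec_beautifulIndex (lista : List Int) (listb : List Int) (out : List (Int × Int)) : Prop := out = beautifulIndex_alt lista listb
instance (lista : List Int) (listb : List Int) (out : List (Int × Int)) : Decidable (Spec_beautifulIndex lista listb out) := by unfold Spec_beautifulIndex; infer_instance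

-- ===== CLAIM (what is proved, stated in full; the proofs are below) =====
def Claim_equal_beautifulIndex : Prop := ∀ (lista : List Int) (listb : List Int), Dom_beautifulIndex lista listb → Spec_beautifulIndex lista listb (beautifulIndex lista listb)

-- ===== LEMMAS AND PROOFS =====

lemma pos_getD (b : List Int) (x : Int) :
    ((PySem.List.enumerate b 0).foldl (fun d p => d.modify p.2 [] (fun t => t ++ [p.1]))
      (PySem.Dict.empty : PySem.Dict Int (List Int))).getD x []
    = (PySem.List.pyRange 0 (b.length : Int) 1).filter (fun j => PySem.List.pyGetD b j 0 == x) := by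
  have h := PySem.Dict.getD_foldl_modify_append ((PySem.List.enumerate b).map Prod.swap)
    (PySem.Dict.empty : PySem.Dict Int (List Int)) x
  rw [List.foldl_map] at h
  simp only [Prod.swap] at h
  rw [h, PySem.List.enumerate_eq_map_pyRange b 0]
  simp [List.filter_map, List.map_map, Function.comp_def, PySem.List.len]

lemma innerLoop_eq (a b : List Int) (i : Int) (acc : List (Int × Int)) :
    (PySem.List.pyRange 0 (b.length : Int) 1).foldl (fun acc2 j =>
      if PySem.List.pyGetD a i 0 = PySem.List.pyGetD b j 0 then acc2 ++ [(i, j)] else acc2) acc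
    = acc ++ ((PySem.List.pyRange 0 (b.length : Int) 1).filter
        (fun j => PySem.List.pyGetD b j 0 == PySem.List.pyGetD a i 0)).map (fun j => (i, j)) := by
  have h := PySem.List.foldl_append_if (fun j => PySem.List.pyGetD b j 0 == PySem.List.pyGetD a i 0)
    (fun j => (i, j)) (PySem.List.pyRange 0 (b.length : Int) 1) acc
  simp only [beq_iff_eq] at h
  rw [← h]
  apply PySem.List.foldl_congr_mem
  intro acc2 j _
  by_cases hc : PySem.List.pyGetD a i 0 = PySem.List.pyGetD b j 0
  · simp [hc]
  · simp [hc, Ne.symm hc]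

lemma core (a b : List Int) :
    (PySem.List.pyRange 0 (a.length : Int) 1).foldl (fun acc i =>
      (PySem.List.pyRange 0 (b.length : Int) 1).foldl (fun acc2 j =>
        if PySem.List.pyGetD a i 0 = PySem.List.pyGetD b j 0 then acc2 ++ [(i, j)] else acc2) acc) []
    = (PySem.List.enumerate a 0).foldl (fun acc p =>
        acc ++ (((PySem.List.enumerate b 0).foldl (fun d p => d.modify p.2 [] (fun t => t ++ [p.1]))
          (PySem.Dict.empty : PySem.Dict Int (List Int))).getD p.2 []).map (fun j => (p.1, j))) [] := by
  rw [PySem.List.enumerate_eq_map_pyRange a 0, List.foldl_map]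
  simp only [PySem.List.len]
  apply PySem.List.foldl_congr_mem
  intro acc i _
  rw [innerLoop_eq, pos_getD]

-- ===== VERDICT (by name: the statement is the Claim_ definition above) =====
theorem beautifulIndex_spec : Claim_equal_beautifulIndex := by
  intro lista listb _
  unfold Spec_beautifulIndex beautifulIndex beautifulIndex_alt
  exact core _ _
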